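-- pv_equiv track=rewrite | github.com/real-stanford/im2Flow2Act | im2flow2act/common/utility/parallel.py | assign_task_bounds_to_gpus
-- ===== SOURCE A (Python) =====
-- def assign_task_bounds_to_gpus(n_tasks, n_gpus):
--     """
--     Assigns task ID bounds to GPUs as evenly as possible.
--
--     Parameters:
--     n_tasks (int): Number of tasks to be distributed.
--     n_gpus (int): Number of GPUs available.
--
--     Returns:
--     list: A list of tuples where each tuple represents the lower (inclusive)
--           and upper (exclusive) bounds of task IDs for that GPU.
--     """
--     # Calculate the base number of tasks per GPU and the remainder
--     tasks_per_gpu = n_tasks // n_gpus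
--     remainder = n_tasks % n_gpus
--
--     # Initialize the starting task ID
--     start_id = 0
--
--     # Distribute tasks to GPUs
--     task_bounds = []
--     for i in range(n_gpus):
--         # Determine the number of tasks for this GPU
--         num_tasks = tasks_per_gpu + (1 if i < remainder else 0)
--         # Assign the bounds
--         task_bounds.append((start_id, start_id + num_tasks))
--         # Update the starting ID for the next GPU
--         start_id += num_tasks
--
--     return task_bounds
-- ===== SOURCE B (Python) =====
-- def assign_task_bounds_to_gpus(n_tasks, n_gpus):
--     """
--     Assigns task ID bounds to GPUs as evenly as possible.
--
--     Closed-form: GPU i starts at i*q + min(i, r) (the first r GPUs get one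
--     extra task), so each bound is computed directly from i with no
--     loop-carried accumulator.
--     """
--     q, r = divmod(n_tasks, n_gpus)
--     return [(i * q + min(i, r), (i + 1) * q + min(i + 1, r)) for i in range(n_gpus)]
-- ===== Notes on version B (the rewrite author's own statement) =====
-- stated objective: simpler
-- what changed: Replaces the running start_id accumulator loop with a single comprehension computing each GPU's bounds in closed form from its index (lower = i*q + min(i,r), upper = (i+1)*q + min(i+1,r)).
import Mathlib
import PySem

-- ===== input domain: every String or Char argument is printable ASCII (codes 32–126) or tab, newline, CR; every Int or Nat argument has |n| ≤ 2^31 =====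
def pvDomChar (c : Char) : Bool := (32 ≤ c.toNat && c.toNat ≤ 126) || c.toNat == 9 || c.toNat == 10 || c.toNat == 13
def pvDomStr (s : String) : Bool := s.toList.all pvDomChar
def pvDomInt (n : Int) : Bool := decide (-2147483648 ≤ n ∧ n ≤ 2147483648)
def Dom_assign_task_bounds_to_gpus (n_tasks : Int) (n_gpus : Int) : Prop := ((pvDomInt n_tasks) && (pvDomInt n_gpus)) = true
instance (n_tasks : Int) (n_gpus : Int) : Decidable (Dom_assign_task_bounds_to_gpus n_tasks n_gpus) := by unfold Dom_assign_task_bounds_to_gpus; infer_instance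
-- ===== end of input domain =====

-- B replaces A's running start_id accumulator with a closed form per GPU index (simpler decomposition, same cost).


-- ===== PORT A =====
def assign_task_bounds_to_gpus (n_tasks : Int) (n_gpus : Int) : List (Int × Int) :=
  let tasks_per_gpu := PySem.Int.floordiv n_tasks n_gpus
  let remainder := PySem.Int.mod n_tasks n_gpus
  let st := (PySem.List.pyRange 0 n_gpus 1).foldl
    (fun (st : Int × List (Int × Int)) i =>
      let num_tasks := tasks_per_gpu + (if i < remainder then 1 else 0)
      (st.1 + num_tasks, st.2 ++ [(st.1, st.1 + num_tasks)]))
    (0, [])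
  st.2

-- ===== PORT B =====
def assign_task_bounds_to_gpus_alt (n_tasks : Int) (n_gpus : Int) : List (Int × Int) :=
  let q := PySem.Int.floordiv n_tasks n_gpus
  let r := PySem.Int.mod n_tasks n_gpus
  (PySem.List.pyRange 0 n_gpus 1).map
    (fun i => (i * q + min i r, (i + 1) * q + min (i + 1) r))

-- ===== PRECONDITION & SPEC =====
-- Python raises ZeroDivisionError on n_gpus = 0 (the '//' in A, the divmod in B).
def Pre_assign_task_bounds_to_gpus (n_tasks : Int) (n_gpus : Int) : Prop := n_gpus ≠ 0
instance (n_tasks : Int) (n_gpus : Int) : Decidable (Pre_assign_task_bounds_to_gpus n_tasks n_gpus) := by unfold Pre_assign_task_bounds_to_gpus; infer_instance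
def pvWitness_assign_task_bounds_to_gpus : Int × Int := (10, 3)

def Spec_assign_task_bounds_to_gpus (n_tasks : Int) (n_gpus : Int) (out : List (Int × Int)) : Prop := out = assign_task_bounds_to_gpus_alt n_tasks n_gpus
instance (n_tasks : Int) (n_gpus : Int) (out : List (Int × Int)) : Decidable (Spec_assign_task_bounds_to_gpus n_tasks n_gpus out) := by unfold Spec_assign_task_bounds_to_gpus; infer_instance

-- ===== CLAIM (what is proved, stated in full; the proofs are below) =====
def Claim_equal_assign_task_bounds_to_gpus : Prop := ∀ (n_tasks : Int) (n_gpus : Int), Dom_assign_task_bounds_to_gpus n_tasks n_gpus → Pre_assign_task_bounds_to_gpus n_tasks n_gpus → Spec_assign_task_bounds_to_gpus n_tasks n_gpus (assign_task_bounds_to_gpus n_tasks n_gpus)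

-- ===== LEMMAS AND PROOFS =====

-- Loop invariant: starting A's loop at index a with start_id = a*q + min a r
-- produces exactly B's closed-form bounds for the remaining indices.
theorem atb_loop_eq (q r : Int) (n : Int) (a : Int) (acc : List (Int × Int)) :
    ((PySem.List.pyRange a n 1).foldl
      (fun (st : Int × List (Int × Int)) i =>
        (st.1 + (q + (if i < r then 1 else 0)),
         st.2 ++ [(st.1, st.1 + (q + (if i < r then 1 else 0)))]))
      (a * q + min a r, acc)).2
    = acc ++ (PySem.List.pyRange a n 1).map
        (fun i => (i * q + min i r, (i + 1) * q + min (i + 1) r)) := by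
  by_cases h : a < n
  · rw [PySem.List.pyRange_one_cons h, List.foldl_cons, List.map_cons]
    have hstart : a * q + min a r + (q + (if a < r then 1 else 0))
        = (a + 1) * q + min (a + 1) r := by
      by_cases hr : a < r <;> simp [hr] <;> ring_nf <;> omega
    have := atb_loop_eq q r n (a + 1) (acc ++ [(a * q + min a r, a * q + min a r + (q + (if a < r then 1 else 0)))])
    simp only [hstart] at this ⊢
    rw [this, List.append_assoc]
    simp [hstart]
  · have hnil : PySem.List.pyRange a n 1 = [] := PySem.List.pyRange_one_eq_nil (by omega)
    rw [hnil]; simp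
termination_by (n - a).toNat
decreasing_by omega

-- ===== VERDICT (by name: the statement is the Claim_ definition above) =====
theorem assign_task_bounds_to_gpus_spec : Claim_equal_assign_task_bounds_to_gpus := by
  intro n_tasks n_gpus _ hpre
  unfold Spec_assign_task_bounds_to_gpus assign_task_bounds_to_gpus assign_task_bounds_to_gpus_alt
  by_cases hg : 0 < n_gpus
  · have hr : 0 ≤ PySem.Int.mod n_tasks n_gpus := PySem.Int.mod_nonneg _ hg
    have h := atb_loop_eq (PySem.Int.floordiv n_tasks n_gpus) (PySem.Int.mod n_tasks n_gpus) n_gpus 0 []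
    have h0 : min (0 : Int) (PySem.Int.mod n_tasks n_gpus) = 0 := by omega
    simp only [zero_mul, zero_add, h0, List.nil_append] at h
    simpa using h
  · have hnil : PySem.List.pyRange 0 n_gpus 1 = [] := PySem.List.pyRange_one_eq_nil (by omega)
    simp [hnil]
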